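-- pv_equiv track=rewrite | github.com/Ben-Rapkin-Oberlin/gflownet_for_FS | attempt1.py | backward_policy
-- ===== SOURCE A (Python) =====
-- def backward_policy(state):
--     # Define backward policy based on current state
--     if not state:
--         return []
--     predecessors = []
--     for feature in state:
--         predecessor = tuple(sorted(set(state) - {feature}))
--         predecessors.append(predecessor)
--     return predecessors
-- ===== SOURCE B (Python) =====
-- def backward_policy(state):
--     # Define backward policy based on current state
--     if not state:
--         return []
--     base = sorted(set(state))
--     table = {v: tuple(base[:i] + base[i + 1:]) for i, v in enumerate(base)}
--     return [table[f] for f in state]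
-- ===== Notes on version B (the rewrite author's own statement) =====
-- stated objective: faster
-- what changed: Sort the distinct values once and precompute each value's predecessor tuple by slicing the sorted base, then answer every feature by an O(1) table lookup instead of rebuilding a set difference and re-sorting per feature.
import Mathlib
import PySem

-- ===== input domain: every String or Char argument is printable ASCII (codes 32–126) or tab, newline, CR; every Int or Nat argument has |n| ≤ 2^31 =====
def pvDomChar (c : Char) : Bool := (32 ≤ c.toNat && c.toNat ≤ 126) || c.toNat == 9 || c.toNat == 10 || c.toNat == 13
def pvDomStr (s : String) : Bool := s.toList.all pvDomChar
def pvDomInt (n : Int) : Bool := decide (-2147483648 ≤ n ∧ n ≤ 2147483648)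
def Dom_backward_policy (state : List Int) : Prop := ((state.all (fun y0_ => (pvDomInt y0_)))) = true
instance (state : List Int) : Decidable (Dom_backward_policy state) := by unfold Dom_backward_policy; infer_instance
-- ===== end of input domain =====

-- B sorts the distinct values once, precomputes each value's predecessor tuple by slicing
-- the sorted base, and answers every feature by a table lookup, instead of A's
-- set-difference-and-sort per feature.

-- ===== PORT A =====
def backward_policy (state : List Int) : List (List Int) :=
  if state = [] then []
  else
    -- for feature in state: predecessors.append(tuple(sorted(set(state) - {feature})))
    state.foldl
      (fun predecessors feature =>
        predecessors ++
          [PySem.List.sorted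
            (PySem.Set.diff (PySem.Set.ofList state) (PySem.Set.ofList [feature]))
            (fun x => x) false])
      []

-- ===== PORT B =====
def backward_policy_alt (state : List Int) : List (List Int) :=
  if state = [] then []
  else
    let base := PySem.List.sorted (PySem.Set.ofList state) (fun x => x) false
    -- table = {v: tuple(base[:i] + base[i+1:]) for i, v in enumerate(base)}
    let table := (PySem.List.enumerate base 0).foldl
      (fun d p =>
        d.insert p.2
          (PySem.List.slice base none (some p.1) ++
           PySem.List.slice base (some (p.1 + 1)) none))
      PySem.Dict.empty
    -- table[f]: the key is always present (every feature of state occurs in base),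
    -- so Python's table[f] never raises; its value is (table.get? f).getD [].
    state.map (fun f => (table.get? f).getD [])

-- ===== PRECONDITION & SPEC =====
def Spec_backward_policy (state : List Int) (out : List (List Int)) : Prop := out = backward_policy_alt state
instance (state : List Int) (out : List (List Int)) : Decidable (Spec_backward_policy state out) := by unfold Spec_backward_policy; infer_instance

-- ===== CLAIM (what is proved, stated in full; the proofs are below) =====
def Claim_equal_backward_policy : Prop := ∀ (state : List Int), Dom_backward_policy state → Spec_backward_policy state (backward_policy state)

-- ===== LEMMAS AND PROOFS =====

-- For the key base[i], B's fold-built table returns base.take i ++ base.drop (i+1)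
-- (the port of base[:i] + base[i+1:]).
theorem table_lookup (base : List Int) (i : Nat) (hi : i < base.length)
    (hnd : base.Nodup) :
    (((PySem.List.enumerate base 0).foldl
      (fun d p =>
        d.insert p.2
          (PySem.List.slice base none (some p.1) ++
           PySem.List.slice base (some (p.1 + 1)) none))
      PySem.Dict.empty).get? base[i]).getD []
    = base.take i ++ base.drop (i + 1) := by
  have hmapsnd : ((PySem.List.enumerate base 0).map (·.2)) = base :=
    PySem.List.map_snd_enumerate base 0
  have hitems := PySem.Dict.items_foldl_insert_fresh (l := PySem.List.enumerate base 0)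
    (k := (·.2)) (v := fun p => (PySem.List.slice base none (some p.1) ++
           PySem.List.slice base (some (p.1 + 1)) none)) (d := PySem.Dict.empty)
    (by intro a _; simp [PySem.Dict.contains_empty]) (by rw [hmapsnd]; exact hnd)
  have hkeysnd := PySem.Dict.nodup_keys_foldl_insert_key (PySem.List.enumerate base 0)
    (·.2) (fun d p => (PySem.List.slice base none (some p.1) ++
           PySem.List.slice base (some (p.1 + 1)) none)) PySem.Dict.empty
    PySem.Dict.nodup_keys_empty
  have hmem : ((base[i] : Int), base.take i ++ base.drop (i + 1)) ∈
      ((PySem.List.enumerate base 0).foldl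
      (fun d p =>
        d.insert p.2
          (PySem.List.slice base none (some p.1) ++
           PySem.List.slice base (some (p.1 + 1)) none))
      PySem.Dict.empty).items := by
    rw [hitems]
    have : ((i : Int), base[i]) ∈ PySem.List.enumerate base 0 := by
      rw [PySem.List.mem_enumerate_iff]
      exact ⟨i, hi, by simp⟩
    refine List.mem_append_right _ ?_
    refine List.mem_map.2 ⟨((i : Int), base[i]), this, ?_⟩
    have h1 : PySem.List.slice base none (some (i : Int)) = base.take i :=
      PySem.List.slice_to_natCast base i
    have h2 : PySem.List.slice base (some ((i : Int) + 1)) none = base.drop (i + 1) := by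
      have := PySem.List.slice_from_natCast base (i + 1)
      push_cast at this ⊢
      exact this
    simp [h1, h2]
  have := PySem.Dict.get?_of_mem_items _ hmem hkeysnd
  rw [this]
  rfl

-- A's per-feature value sorted(set(state) - {f}) is the sorted base with the
-- (unique) occurrence of f cut out.
theorem per_feature (state : List Int) (f : Int) (i : Nat)
    (hi : i < (PySem.List.sorted (PySem.Set.ofList state) (fun x => x) false).length)
    (hfi : (PySem.List.sorted (PySem.Set.ofList state) (fun x => x) false)[i] = f) :
    PySem.List.sorted (PySem.Set.diff (PySem.Set.ofList state) (PySem.Set.ofList [f]))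
      (fun x => x) false
    = (PySem.List.sorted (PySem.Set.ofList state) (fun x => x) false).take i ++
      (PySem.List.sorted (PySem.Set.ofList state) (fun x => x) false).drop (i + 1) := by
  set base := PySem.List.sorted (PySem.Set.ofList state) (fun x => x) false with hbase
  have hlt : base.Pairwise (· < ·) := PySem.List.sorted_ofList_pairwise_lt state
  have hnd : base.Nodup := hlt.imp (fun h => ne_of_lt h)
  have hperm : base.Perm (PySem.Set.ofList state) := PySem.List.sorted_perm _ _ _
  have hsplit : base = base.take i ++ base[i] :: base.drop (i + 1) := by
    conv_lhs => rw [← List.take_append_drop i base]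
    rw [List.drop_eq_getElem_cons hi]
  have hndsplit := hsplit ▸ hnd
  rw [List.nodup_append] at hndsplit
  obtain ⟨-, hndcons, hdisj⟩ := hndsplit
  have hni1 : base[i] ∉ base.take i := fun h => hdisj _ h _ List.mem_cons_self rfl
  have hni2 : base[i] ∉ base.drop (i + 1) := (List.nodup_cons.1 hndcons).1
  have hsub : (base.take i ++ base.drop (i + 1)).Sublist base := by
    conv_rhs => rw [hsplit]
    exact (List.sublist_cons_self _ _).append_left _
  refine PySem.List.sorted_eq_of_perm_of_pairwise_lt _ _ _ ?_ (hlt.sublist hsub)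
  refine (List.perm_ext_iff_of_nodup (hnd.sublist hsub)
    (PySem.Set.nodup_diff _ _ (PySem.Set.nodup_ofList state))).2 ?_
  intro y
  rw [PySem.Set.mem_diff]
  constructor
  · intro hy
    have hyb : y ∈ base := hsub.mem hy
    refine ⟨(hperm.mem_iff).1 hyb, ?_⟩
    intro hyf
    have : y = f := by simpa [PySem.Set.mem_ofList] using hyf
    subst this
    rw [← hfi] at hy
    cases List.mem_append.1 hy with
    | inl h => exact hni1 h
    | inr h => exact hni2 h
  · rintro ⟨hy1, hy2⟩
    have hyb : y ∈ base := (hperm.mem_iff).2 hy1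
    have hynf : y ≠ f := by
      intro h; exact hy2 (by simp [PySem.Set.mem_ofList, h])
    rw [hsplit] at hyb
    cases List.mem_append.1 hyb with
    | inl h => exact List.mem_append_left _ h
    | inr h =>
      cases List.mem_cons.1 h with
      | inl h' => exact absurd (h'.trans hfi) hynf
      | inr h' => exact List.mem_append_right _ h'

-- ===== VERDICT (by name: the statement is the Claim_ definition above) =====
theorem backward_policy_spec : Claim_equal_backward_policy := by
  intro state _dom
  unfold Spec_backward_policy backward_policy backward_policy_alt
  by_cases h : state = []
  · simp [h]
  · simp only [if_neg h]
    rw [PySem.List.foldl_append_singleton_eq_map, List.nil_append]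
    refine List.map_congr_left ?_
    intro f hf
    have hfb : f ∈ PySem.List.sorted (PySem.Set.ofList state) (fun x => x) false := by
      rw [PySem.List.mem_sorted]
      exact (PySem.Set.mem_ofList _ _).2 hf
    obtain ⟨i, hi, hfi⟩ := List.mem_iff_getElem.1 hfb
    have hlt := PySem.List.sorted_ofList_pairwise_lt state
    have hnd : (PySem.List.sorted (PySem.Set.ofList state) (fun x => x) false).Nodup :=
      hlt.imp (fun h => ne_of_lt h)
    rw [← hfi, table_lookup _ i hi hnd]
    exact per_feature state _ i hi rfl
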